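-- pv_equiv track=rewrite | github.com/jschanker/functional-python | logic-oriented functions.py | NumOfSimilaritiesAndMatchesToCase
-- ===== SOURCE A (Python) =====
-- def NumOfSimilaritiesAndMatchesToCase(List,Case):#returns as (Similarities,Matches)
--     Similarities=0
--     Matches=0
--     for index in range(len(List)):
--         if str(List[index])==str(Case):#Match
--             Matches+=1
--         elif str(Case) in str(List[index]):#Similarity
--             Similarities+=1
--     return Similarities,Matches
-- ===== SOURCE B (Python) =====
-- def NumOfSimilaritiesAndMatchesToCase(List, Case):
--     # Two independent aggregate counts; equality implies containment, so
--     # similarities = (elements containing Case) - (exact matches).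
--     sc = str(Case)
--     matches = sum(1 for x in List if str(x) == sc)
--     contains = sum(1 for x in List if sc in str(x))
--     return contains - matches, matches
-- ===== Notes on version B (the rewrite author's own statement) =====
-- stated objective: alternative
-- what changed: Replaces the single loop with a mutually-exclusive if/elif accumulator by two independent aggregate counts (exact matches and substring containments) combined by subtraction, using the fact that equality implies containment.
import Mathlib
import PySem

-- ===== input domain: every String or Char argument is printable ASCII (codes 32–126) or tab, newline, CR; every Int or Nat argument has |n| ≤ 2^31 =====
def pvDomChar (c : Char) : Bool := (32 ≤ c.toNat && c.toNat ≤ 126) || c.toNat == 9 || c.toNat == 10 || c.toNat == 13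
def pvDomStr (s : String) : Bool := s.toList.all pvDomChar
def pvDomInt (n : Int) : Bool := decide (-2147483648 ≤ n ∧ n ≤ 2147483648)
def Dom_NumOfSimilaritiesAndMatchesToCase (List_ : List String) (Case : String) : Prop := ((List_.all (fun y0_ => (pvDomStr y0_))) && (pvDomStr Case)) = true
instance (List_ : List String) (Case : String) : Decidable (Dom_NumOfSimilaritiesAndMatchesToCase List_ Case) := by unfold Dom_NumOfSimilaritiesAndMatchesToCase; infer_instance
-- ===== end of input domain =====

-- ===== PORT A =====
-- B replaces A's single if/elif loop by two independent counts combined by subtraction.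
-- (Arguments are strings, so Python's str(...) calls are identity and are not re-applied.)
def NumOfSimilaritiesAndMatchesToCase (List_ : List String) (Case : String) : Int × Int :=
  List_.foldl
    (fun (acc : Int × Int) x =>
      if x == Case then (acc.1, acc.2 + 1)
      else if PySem.Str.isIn Case x then (acc.1 + 1, acc.2)
      else acc)
    (0, 0)

-- ===== PORT B =====
def NumOfSimilaritiesAndMatchesToCase_alt (List_ : List String) (Case : String) : Int × Int :=
  let nMatch : Int := (List_.filter (fun x => x == Case)).length
  let nContain : Int := (List_.filter (fun x => PySem.Str.isIn Case x)).length
  (nContain - nMatch, nMatch)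

-- ===== PRECONDITION & SPEC =====
def Spec_NumOfSimilaritiesAndMatchesToCase (List_ : List String) (Case : String) (out : Int × Int) : Prop := out = NumOfSimilaritiesAndMatchesToCase_alt List_ Case
instance (List_ : List String) (Case : String) (out : Int × Int) : Decidable (Spec_NumOfSimilaritiesAndMatchesToCase List_ Case out) := by unfold Spec_NumOfSimilaritiesAndMatchesToCase; infer_instance

-- ===== CLAIM (what is proved, stated in full; the proofs are below) =====
def Claim_equal_NumOfSimilaritiesAndMatchesToCase : Prop := ∀ (List_ : List String) (Case : String), Dom_NumOfSimilaritiesAndMatchesToCase List_ Case → Spec_NumOfSimilaritiesAndMatchesToCase List_ Case (NumOfSimilaritiesAndMatchesToCase List_ Case)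

-- ===== LEMMAS AND PROOFS =====

-- ===== VERDICT (by name: the statement is the Claim_ definition above) =====
-- A match is also a containment: x == Case implies Case is a substring of x.
theorem pv_isIn_self (Case : String) : PySem.Str.isIn Case Case = true := by
  simp [PySem.Str.isIn, PySem.Chars.isIn_iff_infix]

theorem pv_foldl_eq (Case : String) (L : List String) (s m : Int) :
    L.foldl
      (fun (acc : Int × Int) x =>
        if x == Case then (acc.1, acc.2 + 1)
        else if PySem.Str.isIn Case x then (acc.1 + 1, acc.2)
        else acc)
      (s, m)
    = (s + ((L.filter (fun x => PySem.Str.isIn Case x)).length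
            - (L.filter (fun x => x == Case)).length : Int),
       m + ((L.filter (fun x => x == Case)).length : Int)) := by
  induction L generalizing s m with
  | nil => simp
  | cons x xs ih =>
    rw [List.foldl_cons, List.filter_cons, List.filter_cons]
    by_cases hx : (x == Case) = true
    · have hxeq : x = Case := by simpa using hx
      subst hxeq
      simp only [hx, pv_isIn_self, if_true, ih, List.length_cons,
        Prod.mk.injEq]
      constructor <;> push_cast <;> ring
    · have hbeq : (x == Case) = false := by simpa using hx
      by_cases hin : PySem.Str.isIn Case x = true
      · simp only [hbeq, hin, Bool.false_eq_true, if_false, if_true, ih, List.length_cons, Prod.mk.injEq]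
        constructor <;> push_cast <;> ring
      · have hinf : PySem.Str.isIn Case x = false := by
          cases h : PySem.Str.isIn Case x <;> simp_all
        simp only [hbeq, hinf, Bool.false_eq_true, if_false, ih]

theorem NumOfSimilaritiesAndMatchesToCase_spec : Claim_equal_NumOfSimilaritiesAndMatchesToCase := by
  intro L Case _
  unfold Spec_NumOfSimilaritiesAndMatchesToCase NumOfSimilaritiesAndMatchesToCase
    NumOfSimilaritiesAndMatchesToCase_alt
  rw [pv_foldl_eq]
  simp
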